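-- pv_equiv track=rewrite | github.com/douglasbolis/PROG2 | manipula_textos/atividades_arquivos/libplnbsi.py | separaPalavras
-- ===== SOURCE A (Python) =====
-- def separaPalavras(pTexto, strSep):
--     auxSep = ''
--     palSep = []
--
--     for i in pTexto:
--         if i not in strSep:
--             auxSep += i
--         elif auxSep:
--             palSep.append(auxSep)
--             auxSep = ''
--         #fim else
--     #fim for
--
--     return palSep
-- ===== SOURCE B (Python) =====
-- def separaPalavras(pTexto, strSep):
--     # Two-stage: first find the indices of all separator characters, then
--     # slice the text between consecutive separator indices (gap > 1 means a
--     # non-empty word); the text after the last separator is never sliced,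
--     # which drops the unterminated final word exactly as required.
--     seps = [i for i, ch in enumerate(pTexto) if ch in strSep]
--     out = []
--     prev = -1
--     for i in seps:
--         if i - prev > 1:
--             out.append(pTexto[prev + 1:i])
--         prev = i
--     return out
-- ===== Notes on version B (the rewrite author's own statement) =====
-- stated objective: alternative
-- what changed: B is a two-stage algorithm: it first computes the list of indices of all separator characters, then slices the text between consecutive separator indices (keeping non-empty gaps), instead of A's single accumulate-and-flush character loop with a current-word buffer.
import Mathlib
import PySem

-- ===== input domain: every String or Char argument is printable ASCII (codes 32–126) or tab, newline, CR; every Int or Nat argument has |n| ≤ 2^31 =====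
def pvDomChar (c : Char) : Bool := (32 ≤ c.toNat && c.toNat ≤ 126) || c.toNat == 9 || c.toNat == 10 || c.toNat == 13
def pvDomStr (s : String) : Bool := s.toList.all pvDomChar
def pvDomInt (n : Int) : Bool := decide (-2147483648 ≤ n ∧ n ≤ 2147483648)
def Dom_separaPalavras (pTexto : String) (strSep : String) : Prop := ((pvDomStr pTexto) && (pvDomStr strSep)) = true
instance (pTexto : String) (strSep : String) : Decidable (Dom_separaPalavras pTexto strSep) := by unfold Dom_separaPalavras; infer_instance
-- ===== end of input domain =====

-- B is a two-stage alternative: it first collects the indices of all separator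
-- characters and then slices the text between consecutive separator indices,
-- instead of A's accumulate-and-flush character loop (same cost).

-- ===== PORT A =====
-- A's accumulate-and-flush loop: state (auxSep, palSep)
def sepALoop (sep : List Char) (aux : List Char) (pal : List String) : List Char → List String
  | [] => pal
  | c :: rest =>
    if ¬ sep.contains c then sepALoop sep (aux ++ [c]) pal rest
    else if aux ≠ [] then sepALoop sep [] (pal ++ [String.ofList aux]) rest
    else sepALoop sep aux pal rest

def separaPalavras (pTexto : String) (strSep : String) : List String :=
  sepALoop strSep.toList [] [] pTexto.toList

-- ===== PORT B =====
-- stage 1: seps = [i for i, ch in enumerate(pTexto) if ch in strSep]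
-- stage 2: fold over seps with state (prev, out), slicing pTexto[prev+1:i]
def separaPalavras_alt (pTexto : String) (strSep : String) : List String :=
  let seps : List Int :=
    ((PySem.List.enumerate pTexto.toList 0).filter (fun q => strSep.toList.contains q.2)).map (·.1)
  (seps.foldl
    (fun (st : Int × List String) i =>
      if i - st.1 > 1 then (i, st.2 ++ [PySem.Str.slice pTexto (some (st.1 + 1)) (some i)])
      else (i, st.2))
    (-1, [])).2

-- ===== PRECONDITION & SPEC =====
def Spec_separaPalavras (pTexto : String) (strSep : String) (out : List String) : Prop := out = separaPalavras_alt pTexto strSep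
instance (pTexto : String) (strSep : String) (out : List String) : Decidable (Spec_separaPalavras pTexto strSep out) := by unfold Spec_separaPalavras; infer_instance

-- ===== CLAIM (what is proved, stated in full; the proofs are below) =====
def Claim_equal_separaPalavras : Prop := ∀ (pTexto : String) (strSep : String), Dom_separaPalavras pTexto strSep → Spec_separaPalavras pTexto strSep (separaPalavras pTexto strSep)

-- ===== LEMMAS AND PROOFS =====

-- the step of B's fold, named for the proofs
def sepBStep (t : String) (st : Int × List String) (i : Int) : Int × List String :=
  if i - st.1 > 1 then (i, st.2 ++ [PySem.Str.slice t (some (st.1 + 1)) (some i)])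
  else (i, st.2)

theorem sepALoop_eq (sep : List Char) (t : String) :
    ∀ (xs : List Char) (k p : Nat) (pal : List String),
      t.toList.drop k = xs → p ≤ k →
      sepALoop sep ((t.toList.drop p).take (k - p)) pal xs
      = ((((PySem.List.enumerate xs (k : Int)).filter (fun q => sep.contains q.2)).map (·.1)).foldl
          (sepBStep t) (((p : Int) - 1), pal)).2 := by
  intro xs
  induction xs with
  | nil => intro k p pal _ _; simp [sepALoop, PySem.List.enumerate]
  | cons c rest ih =>
    intro k p pal hdrop hp
    have hk : k < t.toList.length := by
      by_contra hk
      rw [List.drop_eq_nil_of_le (by omega)] at hdrop; cases hdrop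
    have hdrop' : t.toList.drop (k+1) = rest := by
      rw [← List.drop_drop, hdrop]; rfl
    have hck : t.toList[k] = c := by
      have h0 : (t.toList.drop k)[0]'(by simp [hdrop]) = c := by simp [hdrop]
      simpa using h0
    rw [PySem.List.enumerate_cons]
    simp only [sepALoop, List.filter_cons]
    by_cases hc : sep.contains c
    · -- c is a separator: A flushes (or skips), B's fold consumes index k
      rw [if_neg (not_not_intro hc)]
      simp only [hc, if_true, List.map_cons, List.foldl_cons]
      have hstep : sepBStep t (((p : Int) - 1), pal) (k : Int)
          = ((k : Int), if p < k then
              pal ++ [PySem.Str.slice t (some ((p : Int) - 1 + 1)) (some (k : Int))] else pal) := by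
        unfold sepBStep
        by_cases hpk : p < k
        · rw [if_pos (by push_cast; omega), if_pos hpk]
        · rw [if_neg (by push_cast; omega), if_neg hpk]
      by_cases hpk : p < k
      · -- aux nonempty: flush
        rw [if_pos (by
          simp only [ne_eq, List.take_eq_nil_iff, List.drop_eq_nil_iff, not_or]
          constructor <;> omega)]
        rw [hstep, if_pos hpk]
        have hslice : PySem.Str.slice t (some ((p : Int) - 1 + 1)) (some (k : Int))
            = String.ofList ((t.toList.drop p).take (k - p)) := by
          refine (String.ofList_eq.mpr ?_).symm
          rw [show (p : Int) - 1 + 1 = ((p : Nat) : Int) by ring]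
          simp [PySem.Str.slice, PySem.List.slice_toNat _ (Int.natCast_nonneg p) (Int.natCast_nonneg k)]
        rw [hslice]
        have := ih (k+1) (k+1) (pal ++ [String.ofList ((t.toList.drop p).take (k - p))])
          hdrop' (le_refl _)
        simpa using this
      · -- aux empty: skip
        have hkp : k = p := by omega
        subst hkp
        rw [if_neg (by simp)]
        rw [hstep, if_neg hpk]
        have := ih (k+1) (k+1) pal hdrop' (le_refl _)
        simpa using this
    · -- c is not a separator: A extends aux, B's fold skips index k
      rw [if_pos (by simpa using hc)]
      simp only [hc, if_false, Bool.false_eq_true]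
      have haux : (t.toList.drop p).take (k - p) ++ [c] = (t.toList.drop p).take (k + 1 - p) := by
        have hlen : k - p < (t.toList.drop p).length := by rw [List.length_drop]; omega
        have hidx : (t.toList.drop p)[k - p]'hlen = c := by
          rw [List.getElem_drop]
          rw [getElem_congr rfl (show p + (k - p) = k by omega) (by omega)]
          exact hck
        rw [show k + 1 - p = (k - p) + 1 by omega,
          List.take_succ_eq_append_getElem hlen, hidx]
      rw [haux]
      exact ih (k+1) p pal hdrop' (by omega)

-- ===== VERDICT (by name: the statement is the Claim_ definition above) =====
theorem separaPalavras_spec : Claim_equal_separaPalavras := by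
  intro pTexto strSep _
  show separaPalavras pTexto strSep = separaPalavras_alt pTexto strSep
  have h := sepALoop_eq strSep.toList pTexto pTexto.toList 0 0 [] (by simp) (le_refl 0)
  simpa [separaPalavras, separaPalavras_alt, sepBStep] using h
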